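-- pv_equiv track=rewrite | github.com/13Nikhilgupta/Python | tempCodeFile.py | marcsCakewalk
-- ===== SOURCE A (Python) =====
-- def marcsCakewalk(calorie):
--     min_walk=0
--     for i in range(len(calorie)):
--         sum=0
--         j=i
--         p=0
--         while(True):
--             sum+=((2**p)*calorie[j])
--             p+=1
--             j=(j+1)%len(calorie)
--             if j==i:
--                 break
--
--         if i==0:
--             min_walk=sum
--         else:
--             if min_walk>sum:
--                 min_walk=sum
--
--     return min_walk
-- ===== SOURCE B (Python) =====
-- def marcsCakewalk(calorie):
--     n = len(calorie)
--     if n == 0: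
--         return 0
--     # Horner: s = sum(2**p * calorie[p])
--     s = 0
--     for c in reversed(calorie):
--         s = 2 * s + c
--     best = s
--     top = 1 << (n - 1)
--     # incremental rotation update: S_{i+1} = (S_i - c[i]) // 2 + c[i] * 2**(n-1)
--     for i in range(n - 1):
--         s = (s - calorie[i]) // 2 + calorie[i] * top
--         if s < best:
--             best = s
--     return best
-- ===== Notes on version B (the rewrite author's own statement) =====
-- stated objective: faster
-- what changed: Instead of recomputing each rotation's weighted sum with an inner n-step loop, B computes the first rotation sum once by a Horner pass and derives each next rotation sum in O(1) via S_{i+1} = (S_i - c[i])//2 + c[i]*2^(n-1), taking the running minimum.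
import Mathlib
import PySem

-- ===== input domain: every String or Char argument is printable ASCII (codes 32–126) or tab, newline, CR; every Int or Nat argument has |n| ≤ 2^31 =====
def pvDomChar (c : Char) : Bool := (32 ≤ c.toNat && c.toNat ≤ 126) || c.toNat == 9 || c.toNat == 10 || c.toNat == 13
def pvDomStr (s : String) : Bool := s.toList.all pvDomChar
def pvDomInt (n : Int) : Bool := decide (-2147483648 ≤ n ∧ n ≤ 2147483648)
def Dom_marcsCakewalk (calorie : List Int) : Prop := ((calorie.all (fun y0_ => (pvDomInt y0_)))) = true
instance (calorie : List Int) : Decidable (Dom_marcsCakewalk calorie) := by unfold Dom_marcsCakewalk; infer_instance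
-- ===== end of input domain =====

-- B replaces A's quadratic per-rotation summation by one Horner pass plus an O(1) incremental
-- update per rotation (objective: faster, asymptotic).

-- ===== PORT A =====
-- A's inner `while True` loop: j starts at i and cycles (j+1) % n, so the body runs exactly n
-- times before j == i again; fuel = n is therefore exact.  j is always 0 ≤ j < n, so
-- `c.getD j 0` is exactly Python's `calorie[j]` (no IndexError is reachable).
def pvRotStep (c : List Int) (n i : Nat) : Nat → Nat → Nat → Int → Int
  | 0, _, _, s => s
  | fuel+1, j, p, s =>
    let s' := s + 2 ^ p * c.getD j 0
    let j' := (j + 1) % n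
    if j' = i then s' else pvRotStep c n i fuel j' (p + 1) s'

def marcsCakewalk (calorie : List Int) : Int :=
  (List.range calorie.length).foldl
    (fun min_walk i =>
      let sum := pvRotStep calorie calorie.length i calorie.length i 0 0
      if i = 0 then sum
      else if min_walk > sum then sum else min_walk)
    0

-- ===== PORT B =====
-- indices i in range(n-1) satisfy i < length, so `calorie.getD i 0` is exactly `calorie[i]`.
def marcsCakewalk_alt (calorie : List Int) : Int :=
  let n := calorie.length
  if n = 0 then 0
  else
    let s := calorie.reverse.foldl (fun s c => 2 * s + c) 0
    let top : Int := 2 ^ (n - 1)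
    let r := (List.range (n - 1)).foldl
      (fun (st : Int × Int) i =>
        let s' := PySem.Int.floordiv (st.2 - calorie.getD i 0) 2 + calorie.getD i 0 * top
        (if s' < st.1 then s' else st.1, s'))
      (s, s)
    r.1

-- ===== PRECONDITION & SPEC =====
def Spec_marcsCakewalk (calorie : List Int) (out : Int) : Prop := out = marcsCakewalk_alt calorie
instance (calorie : List Int) (out : Int) : Decidable (Spec_marcsCakewalk calorie out) := by unfold Spec_marcsCakewalk; infer_instance

-- ===== CLAIM (what is proved, stated in full; the proofs are below) =====
def Claim_equal_marcsCakewalk : Prop := ∀ (calorie : List Int), Dom_marcsCakewalk calorie → Spec_marcsCakewalk calorie (marcsCakewalk calorie)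

-- ===== LEMMAS AND PROOFS =====

-- rotation sum: pvR c i = Σ_{p<n} 2^p · c[(i+p) % n]; pvP its partial sum up to k
def pvP (c : List Int) (i k : Nat) : Int :=
  ∑ q ∈ Finset.range k, 2 ^ q * c.getD ((i + q) % c.length) 0

def pvR (c : List Int) (i : Nat) : Int := pvP c i c.length

lemma pvP_zero (c : List Int) (i : Nat) : pvP c i 0 = 0 := by simp [pvP]

lemma pvP_succ (c : List Int) (i k : Nat) :
    pvP c i (k + 1) = pvP c i k + 2 ^ k * c.getD ((i + k) % c.length) 0 := by
  simp [pvP, Finset.sum_range_succ]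

-- A's inner loop computes the rotation sum
lemma pvRotStep_spec (c : List Int) (i : Nat) (hi : i < c.length) :
    ∀ fuel k, fuel + k = c.length → k < c.length →
      pvRotStep c c.length i fuel ((i + k) % c.length) k (pvP c i k) = pvR c i := by
  intro fuel
  induction fuel with
  | zero => intro k h hk; omega
  | succ f ih =>
    intro k h hk
    rw [pvRotStep]
    have hmod : (((i + k) % c.length) + 1) % c.length = (i + (k + 1)) % c.length := by
      rw [Nat.mod_add_mod]; ring_nf
    have hsum : pvP c i k + 2 ^ k * c.getD ((i + k) % c.length) 0 = pvP c i (k + 1) := by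
      rw [pvP_succ]
    simp only [hmod, hsum]
    by_cases hend : k + 1 = c.length
    · have heq : (i + (k + 1)) % c.length = i := by
        rw [hend, Nat.add_mod_right, Nat.mod_eq_of_lt hi]
      rw [if_pos heq, hend]
      rfl
    · have hk1 : k + 1 < c.length := by omega
      have hne : (i + (k + 1)) % c.length ≠ i := by
        rcases Nat.lt_or_ge (i + (k + 1)) c.length with h1 | h1
        · rw [Nat.mod_eq_of_lt h1]; omega
        · have h2 : (i + (k + 1)) % c.length = i + (k + 1) - c.length := by
            rw [Nat.mod_eq_sub_mod h1, Nat.mod_eq_of_lt (by omega)]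
          omega
      rw [if_neg hne]
      exact ih (k + 1) (by omega) hk1

lemma pvRotStep_start (c : List Int) (i : Nat) (hi : i < c.length) :
    pvRotStep c c.length i c.length i 0 0 = pvR c i := by
  have h0 : (i + 0) % c.length = i := by
    rw [Nat.add_zero, Nat.mod_eq_of_lt hi]
  have := pvRotStep_spec c i hi c.length 0 (by omega) (by omega)
  rwa [h0, pvP_zero] at this

-- Horner pass of B computes the 0-rotation sum
lemma horner_foldr (c : List Int) :
    c.foldr (fun x s => 2 * s + x) 0 =
      ∑ p ∈ Finset.range c.length, 2 ^ p * c.getD p 0 := by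
  induction c with
  | nil => simp
  | cons x xs ih =>
    simp only [List.foldr_cons, ih, List.length_cons]
    rw [Finset.sum_range_succ']
    simp only [List.getD_cons_succ, List.getD_cons_zero, pow_zero, one_mul, pow_succ]
    rw [Finset.mul_sum]
    ring_nf

lemma horner_spec (c : List Int) :
    c.reverse.foldl (fun s x => 2 * s + x) 0 = pvR c 0 := by
  rw [List.foldl_reverse]
  show c.foldr (fun x s => 2 * s + x) 0 = _
  rw [horner_foldr, pvR, pvP]
  refine Finset.sum_congr rfl ?_
  intro p hp
  rw [Finset.mem_range] at hp
  rw [Nat.zero_add, Nat.mod_eq_of_lt hp]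

-- B's O(1) incremental update is exact
lemma step_spec (c : List Int) (i : Nat) (hn : 0 < c.length) (hi : i < c.length) :
    PySem.Int.floordiv (pvR c i - c.getD i 0) 2 + c.getD i 0 * 2 ^ (c.length - 1) =
      pvR c (i + 1) := by
  obtain ⟨m, hm⟩ : ∃ m, c.length = m + 1 := ⟨c.length - 1, by omega⟩
  have hsplit : pvR c i - c.getD i 0 =
      2 * ∑ p ∈ Finset.range m, 2 ^ p * c.getD ((i + 1 + p) % c.length) 0 := by
    rw [pvR, pvP, hm, Finset.sum_range_succ']
    simp only [pow_zero, one_mul, Nat.add_zero, ← hm]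
    rw [Nat.mod_eq_of_lt hi]
    rw [Finset.mul_sum]
    have : ∀ p, 2 ^ (p + 1) * c.getD ((i + (p + 1)) % c.length) 0 =
        2 * (2 ^ p * c.getD ((i + 1 + p) % c.length) 0) := by
      intro p
      have : i + (p + 1) = i + 1 + p := by ring
      rw [this, pow_succ]; ring
    simp only [this]
    ring
  rw [hsplit, PySem.Int.floordiv_eq_ediv_of_pos (by omega), Int.mul_ediv_cancel_left _ (by omega)]
  rw [pvR, pvP, hm, Finset.sum_range_succ, ← hm]
  have hlast : (i + 1 + m) % c.length = i := by
    have : i + 1 + m = i + c.length := by omega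
    rw [this, Nat.add_mod_right, Nat.mod_eq_of_lt hi]
  rw [hlast]
  have h1 : c.length - 1 = m := by omega
  rw [h1]
  ring

-- the common min-fold both programs reduce to
def pvMinFold (c : List Int) (t : Nat) : Int :=
  (List.range t).foldl
    (fun mw k => if pvR c (k + 1) < mw then pvR c (k + 1) else mw) (pvR c 0)

-- A equals the min-fold (nonempty case)
lemma A_eq_minFold (c : List Int) (m : Nat) (hm : c.length = m + 1) :
    marcsCakewalk c = pvMinFold c m := by
  unfold marcsCakewalk pvMinFold
  rw [hm, List.range_succ_eq_map, List.foldl_cons, List.foldl_map]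
  have h0 : pvRotStep c (m + 1) 0 (m + 1) 0 0 0 = pvR c 0 := by
    have := pvRotStep_start c 0 (by omega); rwa [hm] at this
  simp only [reduceIte, h0]
  refine PySem.List.foldl_congr_mem _ _ _ _ ?_
  intro mw k hk
  rw [List.mem_range] at hk
  have hk1 : pvRotStep c (m + 1) (k + 1) (m + 1) (k + 1) 0 0 = pvR c (k + 1) := by
    have := pvRotStep_start c (k + 1) (by omega); rwa [hm] at this
  simp only [Nat.succ_ne_zero, if_false, hk1]

-- B's fold invariant: first component is the running min, second the current rotation sum
lemma B_fold_inv (c : List Int) (m : Nat) (hm : c.length = m + 1) :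
    ∀ t, t ≤ m →
      (List.range t).foldl
        (fun (st : Int × Int) i =>
          let s' := PySem.Int.floordiv (st.2 - c.getD i 0) 2 + c.getD i 0 * 2 ^ (c.length - 1)
          (if s' < st.1 then s' else st.1, s'))
        (pvR c 0, pvR c 0) = (pvMinFold c t, pvR c t) := by
  intro t
  induction t with
  | zero => intro _; simp [pvMinFold]
  | succ u ih =>
    intro hu
    rw [List.range_succ, List.foldl_append, ih (by omega), List.foldl_cons, List.foldl_nil]
    have hs : PySem.Int.floordiv (pvR c u - c.getD u 0) 2 + c.getD u 0 * 2 ^ (c.length - 1) =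
        pvR c (u + 1) := step_spec c u (by omega) (by omega)
    simp only [hs]
    unfold pvMinFold
    rw [List.range_succ, List.foldl_append, List.foldl_cons, List.foldl_nil]

-- ===== VERDICT (by name: the statement is the Claim_ definition above) =====
theorem marcsCakewalk_spec : Claim_equal_marcsCakewalk := by
  intro c _
  unfold Spec_marcsCakewalk marcsCakewalk_alt
  rcases Nat.eq_zero_or_pos c.length with h0 | hpos
  · simp only [h0]
    unfold marcsCakewalk
    rw [h0]
    rfl
  · obtain ⟨m, hm⟩ : ∃ m, c.length = m + 1 := ⟨c.length - 1, by omega⟩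
    have hB := B_fold_inv c m hm m (le_refl m)
    simp only [hm, Nat.add_sub_cancel] at hB
    rw [A_eq_minFold c m hm]
    simp only [hm, Nat.succ_ne_zero, if_false, Nat.add_sub_cancel]
    rw [horner_spec c, hB]
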